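-- pv_equiv track=rewrite | github.com/bsod700/svg-minify | minify_svg.py | create_name_mappings
-- ===== SOURCE A (Python) =====
-- def generate_short_name(index):
--     """Generate short names: a, b, c, ..., z, aa, ab, ..., zz, aaa, etc."""
--     name = ''
--     index += 1
--     while index > 0:
--         index -= 1
--         name = chr(97 + (index % 26)) + name
--         index //= 26
--     return name
--
-- def create_name_mappings(ids, classes):
--     """Create mappings from original names to minified names"""
--     id_map = {}
--     class_map = {}
--
--     counter = 0
--     for original_id in ids:
--         id_map[original_id] = generate_short_name(counter)
--         counter += 1
--
--     counter = 0
--     for original_class in classes: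
--         class_map[original_class] = generate_short_name(counter)
--         counter += 1
--
--     return id_map, class_map
-- ===== SOURCE B (Python) =====
-- def create_name_mappings(ids, classes):
--     """Create mappings from original names to minified names.
--     Maintains the current short name directly, incrementing it
--     odometer-style (bijective base-26) instead of recomputing it
--     from a counter for every element."""
--     def advance(name):
--         chars = list(name)
--         i = len(chars) - 1
--         while i >= 0 and chars[i] == 'z':
--             chars[i] = 'a'
--             i -= 1
--         if i < 0:
--             chars.insert(0, 'a')
--         else:
--             chars[i] = chr(ord(chars[i]) + 1)
--         return ''.join(chars)
--
--     id_map = {}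
--     cur = 'a'
--     for original_id in ids:
--         id_map[original_id] = cur
--         cur = advance(cur)
--
--     class_map = {}
--     cur = 'a'
--     for original_class in classes:
--         class_map[original_class] = cur
--         cur = advance(cur)
--
--     return id_map, class_map
-- ===== Notes on version B (the rewrite author's own statement) =====
-- stated objective: alternative
-- what changed: Instead of recomputing each short name from an integer counter via the bijective base-26 helper, B keeps the current short name itself and advances it odometer-style (rightmost char a..z with carry, prepending 'a' on overflow) once per element.
import Mathlib
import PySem

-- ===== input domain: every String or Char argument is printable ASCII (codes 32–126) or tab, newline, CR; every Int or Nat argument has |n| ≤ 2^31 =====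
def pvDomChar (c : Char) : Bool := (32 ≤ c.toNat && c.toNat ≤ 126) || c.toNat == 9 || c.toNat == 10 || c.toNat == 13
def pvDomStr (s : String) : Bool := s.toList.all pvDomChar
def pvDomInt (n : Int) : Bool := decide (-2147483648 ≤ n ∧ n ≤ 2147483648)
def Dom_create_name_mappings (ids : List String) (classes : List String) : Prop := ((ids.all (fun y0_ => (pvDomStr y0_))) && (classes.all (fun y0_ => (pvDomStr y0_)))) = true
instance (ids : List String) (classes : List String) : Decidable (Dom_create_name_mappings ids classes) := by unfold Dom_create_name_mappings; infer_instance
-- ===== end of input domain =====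

-- B replaces the per-element bijective-base-26 recomputation by an odometer-style
-- increment of the running short name (objective: alternative decomposition, same cost).

-- ===== PORT A =====
-- the while loop of generate_short_name: name built by prepending chars
def gsnLoop (index : Nat) (name : List Char) : List Char :=
  if h : index > 0 then
    gsnLoop ((index - 1) / 26) (Char.ofNat (97 + (index - 1) % 26) :: name)
  else name
termination_by index
decreasing_by
  have h1 : (index - 1) / 26 ≤ index - 1 := Nat.div_le_self _ _
  omega

def generate_short_name (index : Nat) : String :=
  String.mk (gsnLoop (index + 1) [])

-- the for loop over one list, carrying the counter
def loopA (xs : List String) (d : PySem.Dict String String) (counter : Nat) :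
    PySem.Dict String String :=
  match xs with
  | [] => d
  | x :: rest => loopA rest (d.insert x (generate_short_name counter)) (counter + 1)

def create_name_mappings (ids : List String) (classes : List String) :
    (List (String × String)) × (List (String × String)) :=
  ((loopA ids PySem.Dict.empty 0).items, (loopA classes PySem.Dict.empty 0).items)

-- ===== PORT B =====
-- advance's while loop scans from the right: port it on the reversed char list
def incRev : List Char → List Char
  | [] => ['a']                                   -- carried past the left end: prepend 'a'
  | c :: rest => if c = 'z' then 'a' :: incRev rest else Char.ofNat (c.toNat + 1) :: rest

def advanceB (cur : List Char) : List Char := (incRev cur.reverse).reverse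

-- the for loop over one list, carrying the current short name
def loopB (xs : List String) (d : PySem.Dict String String) (cur : List Char) :
    PySem.Dict String String :=
  match xs with
  | [] => d
  | x :: rest => loopB rest (d.insert x (String.mk cur)) (advanceB cur)

def create_name_mappings_alt (ids : List String) (classes : List String) :
    (List (String × String)) × (List (String × String)) :=
  ((loopB ids PySem.Dict.empty ['a']).items, (loopB classes PySem.Dict.empty ['a']).items)

-- ===== PRECONDITION & SPEC =====
def Spec_create_name_mappings (ids : List String) (classes : List String) (out : (List (String × String)) × (List (String × String))) : Prop := out = create_name_mappings_alt ids classes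
instance (ids : List String) (classes : List String) (out : (List (String × String)) × (List (String × String))) : Decidable (Spec_create_name_mappings ids classes out) := by unfold Spec_create_name_mappings; infer_instance

-- ===== CLAIM (what is proved, stated in full; the proofs are below) =====
def Claim_equal_create_name_mappings : Prop := ∀ (ids : List String) (classes : List String), Dom_create_name_mappings ids classes → Spec_create_name_mappings ids classes (create_name_mappings ids classes)

-- ===== LEMMAS AND PROOFS =====

-- A's short name for counter c, as a REVERSED char list: genRev (c+1)
def genRev (m : Nat) : List Char :=
  if h : m = 0 then [] else Char.ofNat (97 + (m - 1) % 26) :: genRev ((m - 1) / 26)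
termination_by m
decreasing_by
  have h1 : (m - 1) / 26 ≤ m - 1 := Nat.div_le_self _ _
  omega

theorem gsnLoop_eq (m : Nat) : ∀ acc, gsnLoop m acc = (genRev m).reverse ++ acc := by
  induction m using Nat.strong_induction_on with
  | _ m ih =>
    intro acc
    rw [gsnLoop, genRev]
    rcases Nat.eq_zero_or_pos m with h0 | h0
    · subst h0; simp
    · have hlt : (m - 1) / 26 < m := by
        have := Nat.div_le_self (m - 1) 26; omega
      rw [dif_pos h0, dif_neg (by omega : ¬ m = 0), ih _ hlt]
      simp

theorem char_ne_z (r : Nat) (h : r < 25) : Char.ofNat (97 + r) ≠ 'z' := by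
  interval_cases r <;> decide

theorem char_succ (r : Nat) (h : r < 25) :
    Char.ofNat ((Char.ofNat (97 + r)).toNat + 1) = Char.ofNat (97 + (r + 1)) := by
  interval_cases r <;> decide

theorem incRev_genRev (m : Nat) : incRev (genRev m) = genRev (m + 1) := by
  induction m using Nat.strong_induction_on with
  | _ m ih =>
    by_cases h : m = 0
    · subst h
      rw [genRev, genRev]
      simp [incRev, genRev]
    · rw [genRev, dif_neg h]
      have hr : (m - 1) % 26 < 26 := Nat.mod_lt _ (by omega)
      have hdm := Nat.div_add_mod (m - 1) 26
      by_cases hz : (m - 1) % 26 = 25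
      · -- carry: last char is 'z', roll it to 'a' and increment the rest
        rw [hz]
        have hlt : (m - 1) / 26 < m := by
          have := Nat.div_le_self (m - 1) 26; omega
        have hc : Char.ofNat (97 + 25) = 'z' := by decide
        rw [hc]
        simp only [incRev]
        rw [ih _ hlt]
        conv_rhs => rw [genRev]
        have h1 : (m + 1 - 1) % 26 = 0 := by omega
        have h2 : (m + 1 - 1) / 26 = (m - 1) / 26 + 1 := by omega
        rw [dif_neg (by omega : ¬ m + 1 = 0), h1, h2]
        have ha : Char.ofNat (97 + 0) = 'a' := by decide
        rw [ha]
        simp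
      · -- no carry: increment the last char
        have hlt25 : (m - 1) % 26 < 25 := by omega
        simp only [incRev, if_neg (char_ne_z _ hlt25)]
        rw [char_succ _ hlt25]
        conv_rhs => rw [genRev]
        have h1 : (m + 1 - 1) % 26 = (m - 1) % 26 + 1 := by omega
        have h2 : (m + 1 - 1) / 26 = (m - 1) / 26 := by omega
        rw [dif_neg (by omega : ¬ m + 1 = 0), h1, h2]

theorem loop_eq (xs : List String) :
    ∀ (d : PySem.Dict String String) (c : Nat),
      loopB xs d ((genRev (c + 1)).reverse) = loopA xs d c := by
  induction xs with
  | nil => intro d c; rfl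
  | cons x rest ih =>
    intro d c
    simp only [loopB, loopA]
    have hname : String.mk ((genRev (c + 1)).reverse) = generate_short_name c := by
      rw [generate_short_name, gsnLoop_eq]; simp
    have hadv : advanceB ((genRev (c + 1)).reverse) = (genRev (c + 2)).reverse := by
      rw [advanceB, List.reverse_reverse, incRev_genRev]
    rw [hname, hadv, ih]

theorem genRev_one : (genRev 1).reverse = ['a'] := by
  rw [genRev, dif_neg (by omega : ¬ (1:Nat) = 0), genRev]
  simp

-- ===== VERDICT (by name: the statement is the Claim_ definition above) =====
theorem create_name_mappings_spec : Claim_equal_create_name_mappings := by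
  intro ids classes _
  unfold Spec_create_name_mappings create_name_mappings create_name_mappings_alt
  rw [← genRev_one, loop_eq, loop_eq]
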